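-- pv_equiv track=rewrite | github.com/yashbodhe/CodingNinja | Bit/NumberWithSameBit.py | check
-- ===== SOURCE A (Python) =====
-- def check(n):
--     count0,count1 = 0,0
--     if n==0:count0=1
--     while (n):
--         if n & 1:
--         	count1 += 1
--         else:
--             count0 +=1
--         n >>= 1
--     if count1==count0:
--         return True
--     return False
-- ===== SOURCE B (Python) =====
-- def check(n):
--     # A number has equally many 0- and 1-bits iff twice the number of set
--     # bits equals its bit length.  Count set bits with Kernighan's trick
--     # (m &= m-1 clears the lowest set bit, so the loop runs once per 1-bit),
--     # and get the total digit count from int.bit_length().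
--     if n == 0:
--         return False
--     ones = 0
--     m = n
--     while m:
--         m &= m - 1
--         ones += 1
--     return 2 * ones == n.bit_length()
-- ===== Notes on version B (the rewrite author's own statement) =====
-- stated objective: alternative
-- what changed: Instead of scanning every bit with a shift-and-mask loop keeping two counters, B clears one set bit per iteration with Kernighan's m &= m-1 trick (looping only over the 1-bits) and compares twice that popcount with n.bit_length().
import Mathlib
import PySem

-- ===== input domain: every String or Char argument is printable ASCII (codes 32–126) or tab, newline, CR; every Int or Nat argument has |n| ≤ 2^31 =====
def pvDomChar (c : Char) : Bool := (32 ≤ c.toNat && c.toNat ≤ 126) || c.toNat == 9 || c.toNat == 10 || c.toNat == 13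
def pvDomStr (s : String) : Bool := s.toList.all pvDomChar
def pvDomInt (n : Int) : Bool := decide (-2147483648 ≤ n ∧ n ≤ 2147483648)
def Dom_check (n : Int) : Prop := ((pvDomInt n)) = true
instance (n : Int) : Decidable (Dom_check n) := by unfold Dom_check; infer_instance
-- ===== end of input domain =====

-- B counts set bits only (Kernighan's m &= m-1) and compares 2*popcount with the bit length, instead of A's shift-and-mask loop with two counters (alternative algorithm).


-- ===== PORT A =====
-- the while loop: (n, count0, count1) state; n ≥ 0 so n >>= 1 is n / 2
def checkLoop : Nat → Nat → Nat → Bool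
  | 0, c0, c1 => c1 == c0
  | (m+1), c0, c1 =>
      if (m+1) % 2 = 1 then checkLoop ((m+1) / 2) c0 (c1+1)
      else checkLoop ((m+1) / 2) (c0+1) c1
decreasing_by all_goals exact Nat.div_lt_self (Nat.succ_pos m) (by norm_num)

def check (n : Int) : Bool :=
  let c0 : Nat := if n = 0 then 1 else 0
  checkLoop n.toNat c0 0

-- ===== PORT B =====
-- Kernighan loop: m &= m-1 clears the lowest set bit, ones += 1 each turn
def kernLoop : Nat → Nat → Nat
  | 0, ones => ones
  | (m+1), ones => kernLoop ((m+1) &&& m) (ones+1)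
decreasing_by exact Nat.lt_succ_of_le Nat.and_le_right

-- hand port of int.bit_length(): number of binary digits (0 for 0); exact for n ≥ 0
def bitLen : Nat → Nat
  | 0 => 0
  | (m+1) => bitLen ((m+1) / 2) + 1
decreasing_by exact Nat.div_lt_self (Nat.succ_pos m) (by norm_num)

def check_alt (n : Int) : Bool :=
  if n = 0 then false
  else 2 * kernLoop n.toNat 0 == bitLen n.toNat

-- ===== PRECONDITION & SPEC =====
-- Pre_ excludes negative n, on which Python A's while loop never terminates (n >>= 1 stays -1).
def Pre_check (n : Int) : Prop := 0 ≤ n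
instance (n : Int) : Decidable (Pre_check n) := by unfold Pre_check; infer_instance
def pvWitness_check : Int := 5
def Spec_check (n : Int) (out : Bool) : Prop := out = check_alt n
instance (n : Int) (out : Bool) : Decidable (Spec_check n out) := by unfold Spec_check; infer_instance

-- ===== CLAIM (what is proved, stated in full; the proofs are below) =====
def Claim_equal_check : Prop := ∀ (n : Int), Dom_check n → Pre_check n → Spec_check n (check n)

-- ===== LEMMAS AND PROOFS =====
-- number of 1-bits and of 0-digits of the binary expansion (by halving)
def pop : Nat → Nat
  | 0 => 0
  | (m+1) => (m+1) % 2 + pop ((m+1) / 2)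
decreasing_by exact Nat.div_lt_self (Nat.succ_pos m) (by norm_num)

def zer : Nat → Nat
  | 0 => 0
  | (m+1) => (1 - (m+1) % 2) + zer ((m+1) / 2)
decreasing_by exact Nat.div_lt_self (Nat.succ_pos m) (by norm_num)

theorem checkLoop_eq (m : Nat) : ∀ c0 c1 : Nat,
    checkLoop m c0 c1 = decide (c1 + pop m = c0 + zer m) := by
  induction m using Nat.strong_induction_on with
  | _ m ih =>
    intro c0 c1
    match m with
    | 0 =>
        simp only [checkLoop, pop, zer]
        by_cases h : c1 = c0 <;> simp [h]
    | (k+1) =>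
      have hlt : (k+1) / 2 < k + 1 := Nat.div_lt_self (Nat.succ_pos k) (by norm_num)
      rw [checkLoop, pop, zer]
      by_cases h : (k+1) % 2 = 1
      · simp only [h, ih _ hlt]
        simp; omega
      · simp only [if_neg h, ih _ hlt]
        have h0 : (k+1) % 2 = 0 := by omega
        simp [h0]; omega

theorem bitLen_eq (m : Nat) : bitLen m = pop m + zer m := by
  induction m using Nat.strong_induction_on with
  | _ m ih =>
    match m with
    | 0 => simp [bitLen, pop, zer]
    | (k+1) =>
      have hlt : (k+1) / 2 < k + 1 := Nat.div_lt_self (Nat.succ_pos k) (by norm_num)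
      rw [bitLen, pop, zer, ih _ hlt]
      omega

-- clearing the lowest set bit removes exactly one 1-bit
theorem and_pred_odd (k : Nat) : (2*k+1) &&& (2*k) = 2*k := by
  apply Nat.eq_of_testBit_eq
  intro i
  cases i with
  | zero => rw [Nat.testBit_and]; simp [Nat.testBit_zero]
  | succ j =>
      have h1 : (2*k+1) / 2 = k := by omega
      have h2 : (2*k) / 2 = k := by omega
      rw [Nat.testBit_and]
      simp only [Nat.testBit_add_one, h1, h2]
      simp

theorem and_pred_even (k : Nat) (hk : 0 < k) : (2*k) &&& (2*k - 1) = 2 * (k &&& (k-1)) := by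
  apply Nat.eq_of_testBit_eq
  intro i
  cases i with
  | zero =>
      rw [Nat.testBit_and]
      simp [Nat.testBit_zero]
  | succ j =>
      have h1 : (2*k) / 2 = k := by omega
      have h2 : (2*k - 1) / 2 = k - 1 := by omega
      have h3 : (2 * (k &&& (k-1))) / 2 = k &&& (k-1) := by omega
      rw [Nat.testBit_and]
      simp only [Nat.testBit_add_one, h1, h2, h3]
      rw [Nat.testBit_and]

theorem pop_two_mul (k : Nat) : pop (2*k) = pop k := by
  cases k with
  | zero => simp
  | succ j =>
      have h : 2*(j+1) = (2*j+1) + 1 := by ring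
      rw [h, pop]
      have h1 : (2*j+1+1) % 2 = 0 := by omega
      have h2 : (2*j+1+1) / 2 = j + 1 := by omega
      rw [h1, h2]
      omega

theorem pop_two_mul_add_one (k : Nat) : pop (2*k+1) = pop k + 1 := by
  rw [pop]
  have h1 : (2*k+1) % 2 = 1 := by omega
  have h2 : (2*k+1) / 2 = k := by omega
  rw [h1, h2]; omega

theorem pop_and_pred (m : Nat) (hm : 0 < m) : pop (m &&& (m-1)) + 1 = pop m := by
  induction m using Nat.strong_induction_on with
  | _ m ih =>
    rcases Nat.even_or_odd m with ⟨k, hk⟩ | ⟨k, hk⟩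
    · -- m = 2k, k > 0
      have hk0 : 0 < k := by omega
      have hm2 : m = 2*k := by omega
      subst hm2
      have h2k1 : 2*k - 1 = 2*k - 1 := rfl
      rw [and_pred_even k hk0, pop_two_mul, pop_two_mul]
      exact ih k (by omega) hk0
    · -- m = 2k+1
      have hm2 : m = 2*k+1 := by omega
      subst hm2
      have : (2*k+1) - 1 = 2*k := by omega
      rw [this, and_pred_odd, pop_two_mul, pop_two_mul_add_one]

theorem kernLoop_eq (m : Nat) : ∀ acc : Nat, kernLoop m acc = acc + pop m := by
  induction m using Nat.strong_induction_on with
  | _ m ih =>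
    intro acc
    match m with
    | 0 => simp [kernLoop, pop]
    | (k+1) =>
      have hle : (k+1) &&& k ≤ k := Nat.and_le_right
      rw [kernLoop, ih _ (by omega)]
      have h : (k+1) - 1 = k := rfl
      have := pop_and_pred (k+1) (Nat.succ_pos k)
      rw [h] at this
      omega

-- ===== VERDICT (by name: the statement is the Claim_ definition above) =====
theorem check_spec : Claim_equal_check := by
  intro n _ hpre
  unfold Spec_check check check_alt
  unfold Pre_check at hpre
  by_cases h0 : n = 0
  · subst h0; simp [checkLoop]
  · have hnz : n.toNat ≠ 0 := by omega
    simp only [if_neg h0, checkLoop_eq, kernLoop_eq, bitLen_eq]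
    by_cases h : pop n.toNat = zer n.toNat
    · simp [h]; omega
    · simp [h]
      omega
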